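-- pv_equiv track=rewrite | github.com/dimagi/commcare-hq | corehq/apps/hqadmin/utils.py | parse_celery_workers
-- ===== SOURCE A (Python) =====
-- from itertools import groupby
--
-- def parse_celery_workers(celery_workers):
--     """
--     Parses the response from the flower get workers api into a list of hosts
--     we expect to be running and a list of hosts we expect to be stopped
--     """
--     expect_stopped = []
--     expect_running = list(filter(
--         lambda hostname: not hostname.endswith('_timestamp'),
--         celery_workers,
--     ))
--
--     timestamped_workers = list(filter(
--         lambda hostname: hostname.endswith('_timestamp'),
--         celery_workers,
--     ))
--
--     def _strip_timestamp(hostname):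
--         return '.'.join(hostname.split('.')[:-1])
--
--     timestamped_workers = sorted(timestamped_workers, key=_strip_timestamp)
--
--     for hostname, group in groupby(timestamped_workers, _strip_timestamp):
--
--         sorted_workers = sorted(list(group), reverse=True)
--         expect_running.append(sorted_workers.pop(0))
--         expect_stopped.extend(sorted_workers)
--     return expect_running, expect_stopped
-- ===== SOURCE B (Python) =====
-- def parse_celery_workers(celery_workers):
--     expect_running = []
--     buckets = {}
--     for name in celery_workers:
--         if name.endswith('_timestamp'):
--             key = '.'.join(name.split('.')[:-1])
--             buckets.setdefault(key, []).append(name)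
--         else:
--             expect_running.append(name)
--     expect_stopped = []
--     for key in sorted(buckets):
--         bucket = sorted(buckets[key])
--         expect_running.append(bucket[-1])
--         expect_stopped.extend(reversed(bucket[:-1]))
--     return expect_running, expect_stopped
-- ===== Notes on version B (the rewrite author's own statement) =====
-- stated objective: idiomatic
-- what changed: B replaces A's two filter passes plus a global key-sort plus itertools.groupby by a single bucketing pass into a dict keyed by the stripped hostname, then walks the sorted keys, taking each bucket's maximum as running and the rest (descending) as stopped.
import Mathlib
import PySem

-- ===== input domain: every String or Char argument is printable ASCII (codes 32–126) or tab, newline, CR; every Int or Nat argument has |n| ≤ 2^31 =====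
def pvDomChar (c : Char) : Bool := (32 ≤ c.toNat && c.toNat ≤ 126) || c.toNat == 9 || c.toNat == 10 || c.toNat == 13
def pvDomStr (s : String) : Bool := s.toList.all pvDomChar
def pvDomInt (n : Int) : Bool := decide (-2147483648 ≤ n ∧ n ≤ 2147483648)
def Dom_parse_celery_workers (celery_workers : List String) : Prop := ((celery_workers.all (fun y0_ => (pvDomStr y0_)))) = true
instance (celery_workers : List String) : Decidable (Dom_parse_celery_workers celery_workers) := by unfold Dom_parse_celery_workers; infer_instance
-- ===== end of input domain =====

-- B replaces A's filter-twice / global key-sort / groupby pipeline by a single bucketing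
-- pass into a dict keyed by the stripped name, then walks the sorted keys (objective: idiomatic).

-- ===== PORT A =====
-- '.'.join(hostname.split('.')[:-1])
def pvStripTimestamp (hostname : String) : String :=
  PySem.Str.join "." (PySem.List.slice ((PySem.Str.split? hostname ".").getD []) none (some (-1)))

-- itertools.groupby: maximal runs of consecutive elements with equal key
def pvRunsBy (k : String → String) : List String → List (List String)
  | [] => []
  | x :: rest =>
      (x :: rest.takeWhile (fun y => k y == k x)) ::
        pvRunsBy k (rest.dropWhile (fun y => k y == k x))
  termination_by l => l.length
  decreasing_by
    simp only [List.length_cons]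
    exact Nat.lt_succ_of_le (List.length_dropWhile_le _ _)

def parse_celery_workers (celery_workers : List String) : List String × List String :=
  let expect_running := celery_workers.filter
    (fun hostname => !(PySem.Str.endswith hostname "_timestamp"))
  let timestamped_workers := celery_workers.filter
    (fun hostname => PySem.Str.endswith hostname "_timestamp")
  let timestamped_workers := PySem.List.sorted timestamped_workers pvStripTimestamp
  (pvRunsBy pvStripTimestamp timestamped_workers).foldl
    (fun st grp =>
      let sorted_workers := PySem.List.sorted grp (fun y => y) true
      match sorted_workers with
      | [] => st                                   -- unreachable: groups are nonempty
      | m :: rest => (st.1 ++ [m], st.2 ++ rest))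
    (expect_running, ([] : List String))

-- ===== PORT B =====
def parse_celery_workers_alt (celery_workers : List String) : List String × List String :=
  let st := celery_workers.foldl
    (fun st name =>
      if PySem.Str.endswith name "_timestamp" then
        -- buckets.setdefault(key, []).append(name)
        (st.1, st.2.modify (pvStripTimestamp name) [] (fun b => b ++ [name]))
      else
        (st.1 ++ [name], st.2))
    (([] : List String), (PySem.Dict.empty : PySem.Dict String (List String)))
  let buckets := st.2
  (PySem.List.sorted buckets.keys (fun c => c)).foldl
    (fun st key =>
      let bucket := PySem.List.sorted (buckets.getD key []) (fun y => y)
      match PySem.List.pyGet? bucket (-1) with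
      | none => st                                 -- unreachable: buckets are nonempty
      | some m => (st.1 ++ [m], st.2 ++ (PySem.List.slice bucket none (some (-1))).reverse))
    (st.1, ([] : List String))

-- ===== PRECONDITION & SPEC =====
def Spec_parse_celery_workers (celery_workers : List String) (out : List String × List String) : Prop := out = parse_celery_workers_alt celery_workers
instance (celery_workers : List String) (out : List String × List String) : Decidable (Spec_parse_celery_workers celery_workers out) := by unfold Spec_parse_celery_workers; infer_instance

-- ===== CLAIM (what is proved, stated in full; the proofs are below) =====
def Claim_equal_parse_celery_workers : Prop := ∀ (celery_workers : List String), Dom_parse_celery_workers celery_workers → Spec_parse_celery_workers celery_workers (parse_celery_workers celery_workers)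

-- ===== LEMMAS AND PROOFS =====

-- unfolding equation for insertBy on a cons
theorem pv_insertBy_cons (before : String → String → Bool) (x y : String) (ys : List String) :
    PySem.List.insertBy before x (y :: ys)
      = if before x y then x :: y :: ys else y :: PySem.List.insertBy before x ys := rfl

-- key-filtering commutes with the stable insertion sort (Python sort stability)
theorem pv_filter_insertBy (k : String → String) (c : String) (x : String) (ys : List String)
    (hs : ys.Pairwise (fun a b => k a ≤ k b)) :
    (PySem.List.insertBy (fun a b => decide (k a < k b)) x ys).filter (fun y => k y == c)
      = ys.filter (fun y => k y == c) ++ if (k x == c) = true then [x] else [] := by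
  induction ys with
  | nil =>
    show List.filter _ [x] = _
    by_cases h : (k x == c) = true <;> simp [List.filter, h]
  | cons y t ih =>
    have hyt : ∀ z ∈ t, k y ≤ k z := (List.pairwise_cons.mp hs).1
    have ht : t.Pairwise (fun a b => k a ≤ k b) := (List.pairwise_cons.mp hs).2
    rw [pv_insertBy_cons]
    by_cases hlt : k x < k y
    · rw [if_pos (by simpa using hlt)]
      by_cases hc : (k x == c) = true
      · have hkx : k x = c := by simpa using hc
        have hnone : (y :: t).filter (fun y => k y == c) = [] := by
          rw [List.filter_eq_nil_iff]
          intro z hz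
          have hle : k y ≤ k z := by
            rcases List.mem_cons.mp hz with rfl | hz
            · exact le_refl _
            · exact hyt _ hz
          have hlt2 : k x < k z := lt_of_lt_of_le hlt hle
          simp only [beq_iff_eq]
          intro h; rw [h, hkx] at hlt2; exact absurd hlt2 (lt_irrefl _)
        rw [List.filter_cons, if_pos hc, hnone, if_pos hc]
        simp
      · rw [List.filter_cons, if_neg hc, if_neg hc, List.append_nil]
    · rw [if_neg (by simpa using hlt)]
      rw [List.filter_cons, List.filter_cons, ih ht]
      by_cases hyc : (k y == c) = true <;> simp [hyc]

theorem pv_filter_sorted (k : String → String) (l : List String) (c : String) :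
    (PySem.List.sorted l k).filter (fun y => k y == c) = l.filter (fun y => k y == c) := by
  induction l using List.reverseRecOn with
  | nil => simp [PySem.List.sorted]
  | append_singleton t x ih =>
    rw [PySem.List.sorted_eq_foldl_insertBy, List.foldl_append]
    simp only [List.foldl_cons, List.foldl_nil]
    rw [← PySem.List.sorted_eq_foldl_insertBy,
        pv_filter_insertBy k c x _ (PySem.List.sorted_pairwise t k), ih,
        List.filter_append]
    by_cases h : (k x == c) = true <;> simp [List.filter, h]

-- on a key-sorted list, groupby's runs are the per-key filters, keys in increasing order
theorem pv_runsBy_eq_map_filter (k : String → String) :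
    ∀ (KS : List String) (ys : List String),
    ys.Pairwise (fun a b => k a ≤ k b) → KS.Pairwise (· < ·) →
    (∀ c, c ∈ KS ↔ ∃ y ∈ ys, k y = c) →
    pvRunsBy k ys = KS.map (fun c => ys.filter (fun y => k y == c)) := by
  intro KS
  induction KS with
  | nil =>
    intro ys _ _ hmem
    cases ys with
    | nil => simp [pvRunsBy]
    | cons y t =>
      exfalso
      have := (hmem (k y)).mpr ⟨y, by simp⟩
      simp at this
  | cons c KS' ih =>
    intro ys hsorted hKS hmem
    cases ys with
    | nil =>
      exfalso
      obtain ⟨y, hy, -⟩ := (hmem c).mp (by simp)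
      simp at hy
    | cons y t =>
      have hyt : ∀ z ∈ t, k y ≤ k z := (List.pairwise_cons.mp hsorted).1
      have ht : t.Pairwise (fun a b => k a ≤ k b) := (List.pairwise_cons.mp hsorted).2
      have hcKS : ∀ c' ∈ KS', c < c' := (List.pairwise_cons.mp hKS).1
      have hKS' : KS'.Pairwise (· < ·) := (List.pairwise_cons.mp hKS).2
      -- the head key is the head of KS
      have hc : c = k y := by
        obtain ⟨z, hz, hkz⟩ := (hmem c).mp (by simp)
        have hky : k y = c ∨ k y ∈ KS' := by
          have := (hmem (k y)).mpr ⟨y, by simp, rfl⟩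
          simpa using this
        rcases hky with h | h
        · exact h.symm
        · have h1 : c < k y := hcKS _ h
          rcases List.mem_cons.mp hz with rfl | hz
          · exact hkz.symm
          · exact absurd (lt_of_lt_of_le h1 (hkz ▸ hyt _ hz)) (lt_irrefl _)
      -- after the run of k y's, every element has a strictly larger key
      have hdrop : ∀ z ∈ t.dropWhile (fun z => k z == k y), ¬ (k z == k y) = true := by
        clear hmem ih
        induction t with
        | nil => simp
        | cons z t' iht =>
          intro w hw
          rw [List.dropWhile_cons] at hw
          by_cases hz : (k z == k y) = true
          · rw [if_pos hz] at hw
            exact iht (List.Pairwise.cons (fun u hu => hyt u (by simp [hu]))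
                (List.pairwise_cons.mp ht).2)
              (fun u hu => hyt u (by simp [hu])) (List.pairwise_cons.mp ht).2 w hw
          · rw [if_neg hz] at hw
            have hzy : k y < k z :=
              lt_of_le_of_ne (hyt z (by simp))
                (by simp only [beq_iff_eq] at hz; exact fun h => hz h.symm)
            rcases List.mem_cons.mp hw with rfl | hw
            · exact hz
            · have hlt2 := lt_of_lt_of_le hzy ((List.pairwise_cons.mp ht).1 w hw)
              simp only [beq_iff_eq]
              intro h; rw [h] at hlt2; exact absurd hlt2 (lt_irrefl _)
      have htake : t.takeWhile (fun z => k z == k y) = t.filter (fun z => k z == k y) := by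
        conv_rhs => rw [← List.takeWhile_append_dropWhile (p := fun z => k z == k y) (l := t)]
        rw [List.filter_append,
            List.filter_eq_self.mpr
              (fun a ha => List.mem_takeWhile_imp (p := fun z => k z == k y) ha),
            List.filter_eq_nil_iff.mpr (fun a ha => by simpa using hdrop a ha), List.append_nil]
      have hdropf : t.dropWhile (fun z => k z == k y) = t.filter (fun z => !(k z == k y)) := by
        conv_rhs => rw [← List.takeWhile_append_dropWhile (p := fun z => k z == k y) (l := t)]
        rw [List.filter_append,
            List.filter_eq_nil_iff.mpr
              (fun a ha => by
                have hp := List.mem_takeWhile_imp (p := fun z => k z == k y) ha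
                simp only [hp, Bool.not_true, Bool.false_eq_true, not_false_eq_true]),
            List.filter_eq_self.mpr (fun a ha => by simpa using hdrop a ha), List.nil_append]
      rw [pvRunsBy]
      have hrest := ih (t.dropWhile (fun z => k z == k y))
        (by rw [hdropf]; exact ht.sublist List.filter_sublist)
        hKS'
        (by
          intro c'
          constructor
          · intro hc'
            obtain ⟨z, hz, hkz⟩ := (hmem c').mp (by simp [hc'])
            have hne : c' ≠ c := fun h => absurd (h ▸ hcKS _ hc') (lt_irrefl _)
            rcases List.mem_cons.mp hz with rfl | hz
            · exact absurd (hkz ▸ hc) (Ne.symm hne)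
            · refine ⟨z, ?_, hkz⟩
              rw [hdropf]
              refine List.mem_filter.mpr ⟨hz, ?_⟩
              simp only [Bool.not_eq_eq_eq_not, Bool.not_true, beq_eq_false_iff_ne, ne_eq]
              rw [hkz, ← hc]; exact hne
          · rintro ⟨z, hz, rfl⟩
            have hzt : z ∈ t := List.mem_of_mem_filter (hdropf ▸ hz)
            have hmm : k z = c ∨ k z ∈ KS' := by
              have := (hmem (k z)).mpr ⟨z, by simp [hzt], rfl⟩
              simpa using this
            rcases hmm with h | h
            · exfalso
              have hd := hdrop z hz
              simp only [beq_iff_eq] at hd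
              exact hd (h.trans hc)
            · exact h)
      rw [hrest, List.map_cons]
      congr 1
      · -- head run = filter at key c
        rw [htake, hc, List.filter_cons_of_pos (by simp)]
      · -- remaining runs: filtering the tail equals filtering the whole list for keys ≠ c
        apply List.map_congr_left
        intro c' hc'
        have hne : c ≠ c' := ne_of_lt (hcKS _ hc')
        rw [hdropf, List.filter_filter,
            List.filter_cons_of_neg (by simp only [beq_iff_eq]; rw [← hc]; exact hne)]
        apply List.filter_congr
        intro z hz
        by_cases h : k z = c' <;> simp [h, ← hc, hne.symm]

-- B's single pass splits into the running filter plus a bucket-building fold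
theorem pv_fold_split (xs : List String) (r : List String) (d : PySem.Dict String (List String)) :
    xs.foldl
      (fun st name =>
        if PySem.Str.endswith name "_timestamp" then
          (st.1, st.2.modify (pvStripTimestamp name) [] (fun b => b ++ [name]))
        else
          (st.1 ++ [name], st.2)) (r, d)
    = (r ++ xs.filter (fun h => !(PySem.Str.endswith h "_timestamp")),
       (xs.filter (fun h => PySem.Str.endswith h "_timestamp")).foldl
         (fun d n => d.modify (pvStripTimestamp n) [] (fun b => b ++ [n])) d) := by
  induction xs generalizing r d with
  | nil => simp
  | cons x xs ih =>
    by_cases h : PySem.Str.endswith x "_timestamp" = true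
    · simp only [List.foldl_cons, List.filter_cons, h, Bool.not_true, Bool.false_eq_true,
        if_true, if_false, ite_true, ite_false, ih]
    · simp only [List.foldl_cons, List.filter_cons, h, Bool.not_false, Bool.false_eq_true,
        if_true, if_false, ite_true, ite_false, ih, Bool.not_eq_true]
      rw [List.append_assoc, List.singleton_append]

-- each bucket is the per-key filter of the timestamped list
theorem pv_getD_buckets (ts : List String) (c : String) :
    ((ts.foldl (fun d n => d.modify (pvStripTimestamp n) [] (fun b => b ++ [n]))
        (PySem.Dict.empty : PySem.Dict String (List String))).getD c [])
      = ts.filter (fun n => pvStripTimestamp n == c) := by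
  have hmap : ts.foldl (fun d n => d.modify (pvStripTimestamp n) [] (fun b => b ++ [n]))
        (PySem.Dict.empty : PySem.Dict String (List String))
      = (ts.map (fun n => (pvStripTimestamp n, n))).foldl
          (fun d p => d.modify p.1 [] (fun b => b ++ [p.2])) PySem.Dict.empty := by
    rw [List.foldl_map]
  rw [hmap, PySem.Dict.getD_foldl_modify_append, PySem.Dict.getD_empty, List.nil_append,
      List.filter_map]
  simp [Function.comp_def, List.map_map]

-- the bucket keys are the distinct stripped names
theorem pv_keys_buckets (ts : List String) :
    (ts.foldl (fun d n => d.modify (pvStripTimestamp n) [] (fun b => b ++ [n]))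
        (PySem.Dict.empty : PySem.Dict String (List String))).keys
      = PySem.Set.ofList (ts.map pvStripTimestamp) := by
  rw [PySem.Dict.keys_foldl_modify_key ts pvStripTimestamp [] (fun _ n => (fun b => b ++ [n]))
        PySem.Dict.empty,
      PySem.Dict.keys_empty, PySem.Set.update_nil_left]

-- sorted(g, reverse=True) is the reverse of sorted(g) (values only; keys are the identity)
theorem pv_sorted_rev (g : List String) :
    PySem.List.sorted g (fun y => y) true = (PySem.List.sorted g (fun y => y)).reverse := by
  apply List.eq_of_perm_of_sorted (le := fun a b : String => b ≤ a)
  · exact fun a b _ _ h1 h2 => le_antisymm h2 h1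
  · exact PySem.List.sorted_pairwise_rev g (fun y => y)
  · exact List.pairwise_reverse.mpr (by
      simpa using PySem.List.sorted_pairwise g (fun y => y))
  · exact ((PySem.List.sorted_perm g (fun y => y) true).trans
      ((PySem.List.sorted_perm g (fun y => y) false).symm)).trans (List.reverse_perm _).symm

-- ===== VERDICT (by name: the statement is the Claim_ definition above) =====
theorem parse_celery_workers_spec : Claim_equal_parse_celery_workers := by
  intro xs _
  show parse_celery_workers xs = parse_celery_workers_alt xs
  simp only [parse_celery_workers, parse_celery_workers_alt]
  rw [pv_fold_split xs [] PySem.Dict.empty]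
  simp only [List.nil_append]
  rw [pv_keys_buckets]
  have hruns := pv_runsBy_eq_map_filter pvStripTimestamp
    (PySem.List.sorted (PySem.Set.ofList
      ((xs.filter (fun h => PySem.Str.endswith h "_timestamp")).map pvStripTimestamp))
      (fun c => c))
    (PySem.List.sorted (xs.filter (fun h => PySem.Str.endswith h "_timestamp")) pvStripTimestamp)
    (PySem.List.sorted_pairwise _ _)
    (PySem.List.sorted_ofList_pairwise_lt _)
    (by
      intro c
      rw [PySem.List.mem_sorted, PySem.Set.mem_ofList, List.mem_map]
      constructor
      · rintro ⟨y, hy, rfl⟩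
        exact ⟨y, (PySem.List.mem_sorted _ _ _ _).mpr hy, rfl⟩
      · rintro ⟨y, hy, rfl⟩
        exact ⟨y, (PySem.List.mem_sorted _ _ _ _).mp hy, rfl⟩)
  rw [hruns, List.foldl_map]
  apply PySem.List.foldl_congr_mem
  intro acc c hcKS
  have hcmem : ∃ y ∈ xs.filter (fun h => PySem.Str.endswith h "_timestamp"),
      pvStripTimestamp y = c := by
    rw [PySem.List.mem_sorted, PySem.Set.mem_ofList, List.mem_map] at hcKS
    exact hcKS
  rw [pv_filter_sorted, pv_getD_buckets]
  set f := (xs.filter (fun h => PySem.Str.endswith h "_timestamp")).filter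
    (fun y => pvStripTimestamp y == c) with hf
  have hfne : f ≠ [] := by
    obtain ⟨y, hy, hyc⟩ := hcmem
    intro hnil
    have : y ∈ f := List.mem_filter.mpr ⟨hy, by simp [hyc]⟩
    simp [hnil] at this
  have hbne : PySem.List.sorted f (fun y => y) ≠ [] := by
    rw [ne_eq, PySem.List.sorted_eq_nil_iff]; exact hfne
  obtain ⟨l, a, hla⟩ := (List.eq_nil_or_concat (PySem.List.sorted f (fun y => y))).resolve_left hbne
  rw [pv_sorted_rev, hla, List.concat_eq_append, List.reverse_append, List.reverse_singleton,
      List.singleton_append, PySem.List.pyGet?_neg_one_append_singleton,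
      PySem.List.slice_to_neg_one, List.dropLast_concat]
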